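-- pv_equiv track=rewrite | github.com/mueller-k/wordligami | src/msg-processor/lambda_function.py | convert_wordle_board_to_db_format
-- ===== SOURCE A (Python) =====
-- def convert_wordle_board_to_db_format(wordle_board: list) -> str:
--     wordle_board_db_format = ""
--     for row in wordle_board:
--         row_db_format = (
--             row.replace("\\U0001f7e9", "g")
--             .replace("\\u2b1b", "w")
--             .replace("\\u2b1c", "w")
--             .replace("\\U0001f7e8", "y")
--         )
--         wordle_board_db_format = wordle_board_db_format + row_db_format
--     return wordle_board_db_format
-- ===== SOURCE B (Python) =====
-- def convert_wordle_board_to_db_format(wordle_board: list) -> str: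
--     mapping = {
--         "\\U0001f7e9": "g",
--         "\\u2b1b": "w",
--         "\\u2b1c": "w",
--         "\\U0001f7e8": "y",
--     }
--     out = []
--     for row in wordle_board:
--         i = 0
--         n = len(row)
--         while i < n:
--             for code, letter in mapping.items():
--                 if row.startswith(code, i):
--                     out.append(letter)
--                     i += len(code)
--                     break
--             else:
--                 out.append(row[i])
--                 i += 1
--     return "".join(out)
-- ===== Notes on version B (the rewrite author's own statement) =====
-- stated objective: alternative
-- what changed: A runs four sequential whole-string .replace passes per row and grows the result by repeated '+' concatenation; B makes a single left-to-right scan of each row driven by a code-to-letter table (first matching code wins, which is safe because no two codes can overlap) and joins all pieces once at the end.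
import Mathlib
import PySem

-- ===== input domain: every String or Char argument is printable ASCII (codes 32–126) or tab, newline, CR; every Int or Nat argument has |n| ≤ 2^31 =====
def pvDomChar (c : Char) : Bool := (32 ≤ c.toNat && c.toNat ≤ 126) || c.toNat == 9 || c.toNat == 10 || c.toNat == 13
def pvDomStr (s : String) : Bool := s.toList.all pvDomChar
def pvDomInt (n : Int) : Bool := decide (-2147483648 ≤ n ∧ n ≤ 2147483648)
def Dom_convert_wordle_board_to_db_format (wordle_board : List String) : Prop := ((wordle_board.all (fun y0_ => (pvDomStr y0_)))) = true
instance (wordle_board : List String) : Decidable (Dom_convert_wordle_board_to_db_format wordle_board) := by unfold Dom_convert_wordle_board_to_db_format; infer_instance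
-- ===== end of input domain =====

-- B replaces A's four sequential whole-string .replace passes (plus incremental '+'
-- concatenation) by ONE left-to-right scan per row driven by a code→letter table,
-- joining everything once at the end (objective: alternative single-pass algorithm).

-- ===== PORT A =====
def convert_wordle_board_to_db_format (wordle_board : List String) : String :=
  wordle_board.foldl
    (fun wordle_board_db_format row =>
      wordle_board_db_format ++
        (PySem.Str.replace
          (PySem.Str.replace
            (PySem.Str.replace
              (PySem.Str.replace row "\\U0001f7e9" "g")
              "\\u2b1b" "w")
            "\\u2b1c" "w")
          "\\U0001f7e8" "y"))
    ""

-- ===== PORT B =====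
-- B's mapping table, in its insertion order (code characters, replacement letter)
def pvCodes : List (List Char × Char) :=
  [("\\U0001f7e9".toList, 'g'), ("\\u2b1b".toList, 'w'),
   ("\\u2b1c".toList, 'w'), ("\\U0001f7e8".toList, 'y')]

-- B's inner for-loop over the table: the first code the row starts with at the
-- current position, together with its length (= how far B's index i advances)
def pvMatch (l : List Char) : Option (Char × Nat) :=
  (pvCodes.find? (fun cl => cl.1.isPrefixOf l)).map (fun cl => (cl.2, cl.1.length))

-- B's while-loop over one row.  B advances i by k over c :: t; here that is
-- `List.drop (k - 1) t` (= drop k (c :: t), since every code has length ≥ 1),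
-- written this way only so that termination is structural in the list length.
def pvScanRow : List Char → List Char
  | [] => []
  | c :: t =>
    match pvMatch (c :: t) with
    | some (letter, k) => letter :: pvScanRow (List.drop (k - 1) t)
    | none => c :: pvScanRow t
termination_by l => l.length
decreasing_by
  all_goals simp

def convert_wordle_board_to_db_format_alt (wordle_board : List String) : String :=
  String.ofList (wordle_board.flatMap (fun row => pvScanRow row.toList))

-- ===== PRECONDITION & SPEC =====
def Spec_convert_wordle_board_to_db_format (wordle_board : List String) (out : String) : Prop := out = convert_wordle_board_to_db_format_alt wordle_board
instance (wordle_board : List String) (out : String) : Decidable (Spec_convert_wordle_board_to_db_format wordle_board out) := by unfold Spec_convert_wordle_board_to_db_format; infer_instance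

-- ===== CLAIM (what is proved, stated in full; the proofs are below) =====
def Claim_equal_convert_wordle_board_to_db_format : Prop := ∀ (wordle_board : List String), Dom_convert_wordle_board_to_db_format wordle_board → Spec_convert_wordle_board_to_db_format wordle_board (convert_wordle_board_to_db_format wordle_board)

-- ===== LEMMAS AND PROOFS =====

-- the four codes, as char lists
def pG : List Char := "\\U0001f7e9".toList
def pW1 : List Char := "\\u2b1b".toList
def pW2 : List Char := "\\u2b1c".toList
def pY : List Char := "\\U0001f7e8".toList

theorem pG_def : pG = ['\\', 'U', '0', '0', '0', '1', 'f', '7', 'e', '9'] := rfl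
theorem pW1_def : pW1 = ['\\', 'u', '2', 'b', '1', 'b'] := rfl
theorem pW2_def : pW2 = ['\\', 'u', '2', 'b', '1', 'c'] := rfl
theorem pY_def : pY = ['\\', 'U', '0', '0', '0', '1', 'f', '7', 'e', '8'] := rfl

-- a single-pattern left-to-right replacement scan (what Python str.replace does)
def scan1 (p r : List Char) : List Char → List Char
  | [] => []
  | c :: t =>
    if p.isPrefixOf (c :: t) then r ++ scan1 p r (List.drop (p.length - 1) t)
    else c :: scan1 p r t
termination_by l => l.length
decreasing_by
  all_goals simp

theorem go_eq_scan1 (p r : List Char) (hp : p ≠ []) :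
    ∀ (fuel : Nat) (l acc : List Char), l.length ≤ fuel →
      PySem.Chars.replace.go p r fuel l acc = acc.reverse ++ scan1 p r l := by
  intro fuel
  induction fuel with
  | zero =>
      intro l acc hl
      have : l = [] := List.eq_nil_of_length_eq_zero (Nat.le_zero.mp hl)
      subst this
      rw [PySem.Chars.replace.go.eq_def]
      simp [scan1]
  | succ n ih =>
      intro l acc hl
      match l with
      | [] =>
          rw [PySem.Chars.replace.go.eq_def]
          simp [scan1]
      | c :: t =>
          rw [PySem.Chars.replace.go.eq_def]
          simp only
          rw [scan1]
          by_cases hpre : p.isPrefixOf (c :: t)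
          · simp only [hpre, if_true]
            have hdrop : List.drop p.length (c :: t) = List.drop (p.length - 1) t := by
              cases p with
              | nil => exact absurd rfl hp
              | cons a as => simp
            have hplen : 1 ≤ p.length := List.length_pos_of_ne_nil hp
            have hlen : (List.drop p.length (c :: t)).length ≤ n := by
              simp only [List.length_drop]
              simp at hl ⊢
              omega
            rw [ih _ _ hlen, hdrop]
            simp
          · simp only [hpre, if_false, Bool.false_eq_true]
            rw [ih t (c :: acc) (by simp at hl ⊢; omega)]
            simp

theorem replace_eq_scan1 (l p r : List Char) (hp : p ≠ []) :
    PySem.Chars.replace l p r = scan1 p r l := by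
  rw [PySem.Chars.replace]
  simp only [List.isEmpty_iff, hp, if_false]
  rw [go_eq_scan1 p r hp l.length l [] (le_refl _)]
  simp

-- a prefix of the scan's output that avoids the replacement letters was already
-- a prefix of the input (replacing with fresh letters creates no new occurrence)
theorem noNew_aux (p r : List Char) (hr : r ≠ []) :
    ∀ (n : Nat) (u q : List Char), u.length ≤ n →
      (∀ c ∈ r, c ∉ q) → q <+: scan1 p r u → q <+: u := by
  intro n
  induction n with
  | zero =>
      intro u q hu _ h
      have : u = [] := List.eq_nil_of_length_eq_zero (Nat.le_zero.mp hu)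
      subst this
      simpa [scan1] using h
  | succ m ih =>
      intro u q hu hq h
      match u with
      | [] => simpa [scan1] using h
      | c :: t =>
          rw [scan1] at h
          by_cases hpre : p.isPrefixOf (c :: t)
          · rw [if_pos hpre] at h
            match q with
            | [] => exact List.nil_prefix
            | qh :: qt =>
                match r with
                | [] => exact absurd rfl hr
                | rh :: rt =>
                    rw [List.cons_append, List.cons_prefix_cons] at h
                    have : rh ∉ qh :: qt := hq rh (by simp)
                    simp [h.1] at this
          · rw [if_neg hpre] at h
            match q with
            | [] => exact List.nil_prefix
            | qh :: qt =>
                rw [List.cons_prefix_cons] at h ⊢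
                refine ⟨h.1, ih t qt (by simp at hu ⊢; omega) (fun c hc => ?_) h.2⟩
                have := hq c hc
                simp at this
                exact this.2

theorem noNew (p r : List Char) (hr : r ≠ []) (u q : List Char)
    (hq : ∀ c ∈ r, c ∉ q) (h : q <+: scan1 p r u) : q <+: u :=
  noNew_aux p r hr u.length u q (le_refl _) hq h

theorem scan1_cons_ne (p r : List Char) (c : Char) (u : List Char)
    (h : ¬ p <+: (c :: u)) : scan1 p r (c :: u) = c :: scan1 p r u := by
  rw [scan1, if_neg (by simpa [List.isPrefixOf_iff_prefix] using h)]

-- the scan passes an occurrence-free block through untouched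
theorem passthru (p r : List Char) :
    ∀ (pre rest : List Char),
      (∀ i, i < pre.length → ¬ p <+: (pre.drop i ++ rest)) →
      scan1 p r (pre ++ rest) = pre ++ scan1 p r rest := by
  intro pre
  induction pre with
  | nil => intro rest _; simp
  | cons c pre' ih =>
      intro rest h
      rw [List.cons_append, scan1_cons_ne p r c (pre' ++ rest) (by simpa using h 0 (by simp))]
      rw [ih rest (fun i hi => by simpa using h (i + 1) (by simpa using Nat.succ_lt_succ hi))]
      simp

-- the scan consumes its own pattern at the front
theorem scan1_consume (p r rest : List Char) (hp : p ≠ []) :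
    scan1 p r (p ++ rest) = r ++ scan1 p r rest := by
  match p with
  | [] => exact absurd rfl hp
  | a :: as =>
      rw [List.cons_append, scan1,
        if_pos (by simp [List.isPrefixOf_iff_prefix])]
      congr 2
      simp

-- unfolding pvMatch into the four ordered prefix tests
theorem pvMatch_eq (l : List Char) :
    pvMatch l =
      if pG.isPrefixOf l then some ('g', 10)
      else if pW1.isPrefixOf l then some ('w', 6)
      else if pW2.isPrefixOf l then some ('w', 6)
      else if pY.isPrefixOf l then some ('y', 10)
      else none := by
  rw [pvMatch, pvCodes]
  by_cases h1 : pG.isPrefixOf l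
  · rw [List.find?_cons_of_pos (by simpa [pG] using h1), if_pos h1]; rfl
  · rw [List.find?_cons_of_neg (by simpa [pG] using h1), if_neg h1]
    by_cases h2 : pW1.isPrefixOf l
    · rw [List.find?_cons_of_pos (by simpa [pW1] using h2), if_pos h2]; rfl
    · rw [List.find?_cons_of_neg (by simpa [pW1] using h2), if_neg h2]
      by_cases h3 : pW2.isPrefixOf l
      · rw [List.find?_cons_of_pos (by simpa [pW2] using h3), if_pos h3]; rfl
      · rw [List.find?_cons_of_neg (by simpa [pW2] using h3), if_neg h3]
        by_cases h4 : pY.isPrefixOf l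
        · rw [List.find?_cons_of_pos (by simpa [pY] using h4), if_pos h4]; rfl
        · rw [List.find?_cons_of_neg (by simpa [pY] using h4), if_neg h4]; rfl

-- ---- pvScanRow, one step per kind of front ----

theorem pvScanRow_nil : pvScanRow [] = [] := by rw [pvScanRow]

theorem pvScanRow_g (rest : List Char) : pvScanRow (pG ++ rest) = 'g' :: pvScanRow rest := by
  rw [pG_def, List.cons_append, pvScanRow, pvMatch_eq,
    if_pos (by rw [List.isPrefixOf_iff_prefix, pG_def, List.cons_append]; exact List.cons_prefix_cons.mpr ⟨rfl, List.prefix_append _ _⟩)]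
  simp

theorem pvScanRow_w1 (rest : List Char) : pvScanRow (pW1 ++ rest) = 'w' :: pvScanRow rest := by
  rw [pW1_def, List.cons_append, pvScanRow, pvMatch_eq,
    if_neg (by rw [List.isPrefixOf_iff_prefix, pG_def]; simp [List.cons_prefix_cons, List.cons_append]),
    if_pos (by rw [List.isPrefixOf_iff_prefix, pW1_def, List.cons_append]; exact List.cons_prefix_cons.mpr ⟨rfl, List.prefix_append _ _⟩)]
  simp

theorem pvScanRow_w2 (rest : List Char) : pvScanRow (pW2 ++ rest) = 'w' :: pvScanRow rest := by
  rw [pW2_def, List.cons_append, pvScanRow, pvMatch_eq,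
    if_neg (by rw [List.isPrefixOf_iff_prefix, pG_def]; simp [List.cons_prefix_cons, List.cons_append]),
    if_neg (by rw [List.isPrefixOf_iff_prefix, pW1_def]; simp [List.cons_prefix_cons, List.cons_append]),
    if_pos (by rw [List.isPrefixOf_iff_prefix, pW2_def, List.cons_append]; exact List.cons_prefix_cons.mpr ⟨rfl, List.prefix_append _ _⟩)]
  simp

theorem pvScanRow_y (rest : List Char) : pvScanRow (pY ++ rest) = 'y' :: pvScanRow rest := by
  rw [pY_def, List.cons_append, pvScanRow, pvMatch_eq,
    if_neg (by rw [List.isPrefixOf_iff_prefix, pG_def]; simp [List.cons_prefix_cons, List.cons_append]),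
    if_neg (by rw [List.isPrefixOf_iff_prefix, pW1_def]; simp [List.cons_prefix_cons, List.cons_append]),
    if_neg (by rw [List.isPrefixOf_iff_prefix, pW2_def]; simp [List.cons_prefix_cons, List.cons_append]),
    if_pos (by rw [List.isPrefixOf_iff_prefix, pY_def, List.cons_append]; exact List.cons_prefix_cons.mpr ⟨rfl, List.prefix_append _ _⟩)]
  simp

theorem pvScanRow_default (c : Char) (t : List Char)
    (h1 : ¬ pG <+: (c :: t)) (h2 : ¬ pW1 <+: (c :: t))
    (h3 : ¬ pW2 <+: (c :: t)) (h4 : ¬ pY <+: (c :: t)) :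
    pvScanRow (c :: t) = c :: pvScanRow t := by
  rw [pvScanRow, pvMatch_eq,
    if_neg (by rw [List.isPrefixOf_iff_prefix]; exact h1),
    if_neg (by rw [List.isPrefixOf_iff_prefix]; exact h2),
    if_neg (by rw [List.isPrefixOf_iff_prefix]; exact h3),
    if_neg (by rw [List.isPrefixOf_iff_prefix]; exact h4)]

-- ---- the full four-pass pipeline of A, on one row ----
def chain (l : List Char) : List Char :=
  scan1 pY ['y'] (scan1 pW2 ['w'] (scan1 pW1 ['w'] (scan1 pG ['g'] l)))

-- none of the codes starts with a replacement letter
theorem notPre_letter (p : List Char) (hp : p.head? = some '\\') (c : Char)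
    (hc : c ≠ '\\') (u : List Char) : ¬ p <+: (c :: u) := by
  match p with
  | [] => simp at hp
  | a :: as =>
      simp at hp
      subst hp
      rw [List.cons_prefix_cons]
      rintro ⟨h, -⟩
      exact hc h.symm

theorem chain_g (rest : List Char) : chain (pG ++ rest) = 'g' :: chain rest := by
  rw [chain, scan1_consume pG ['g'] rest (by rw [pG_def]; simp), List.singleton_append,
    scan1_cons_ne pW1 _ _ _ (notPre_letter pW1 rfl 'g' (by decide) _),
    scan1_cons_ne pW2 _ _ _ (notPre_letter pW2 rfl 'g' (by decide) _),
    scan1_cons_ne pY _ _ _ (notPre_letter pY rfl 'g' (by decide) _)]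
  rfl

theorem chain_w1 (rest : List Char) : chain (pW1 ++ rest) = 'w' :: chain rest := by
  rw [chain,
    passthru pG ['g'] pW1 rest (by
      intro i hi
      rw [pW1_def] at hi ⊢
      simp at hi
      interval_cases i <;> simp [pG_def, List.cons_prefix_cons]),
    scan1_consume pW1 ['w'] _ (by rw [pW1_def]; simp), List.singleton_append,
    scan1_cons_ne pW2 _ _ _ (notPre_letter pW2 rfl 'w' (by decide) _),
    scan1_cons_ne pY _ _ _ (notPre_letter pY rfl 'w' (by decide) _)]
  rfl

theorem chain_w2 (rest : List Char) : chain (pW2 ++ rest) = 'w' :: chain rest := by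
  rw [chain,
    passthru pG ['g'] pW2 rest (by
      intro i hi
      rw [pW2_def] at hi ⊢
      simp at hi
      interval_cases i <;> simp [pG_def, List.cons_prefix_cons]),
    passthru pW1 ['w'] pW2 _ (by
      intro i hi
      rw [pW2_def] at hi ⊢
      simp at hi
      interval_cases i <;> simp [pW1_def, List.cons_prefix_cons]),
    scan1_consume pW2 ['w'] _ (by rw [pW2_def]; simp), List.singleton_append,
    scan1_cons_ne pY _ _ _ (notPre_letter pY rfl 'w' (by decide) _)]
  rfl

theorem chain_y (rest : List Char) : chain (pY ++ rest) = 'y' :: chain rest := by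
  rw [chain,
    passthru pG ['g'] pY rest (by
      intro i hi
      rw [pY_def] at hi ⊢
      simp at hi
      interval_cases i <;> simp [pG_def, List.cons_prefix_cons]),
    passthru pW1 ['w'] pY _ (by
      intro i hi
      rw [pY_def] at hi ⊢
      simp at hi
      interval_cases i <;> simp [pW1_def, List.cons_prefix_cons]),
    passthru pW2 ['w'] pY _ (by
      intro i hi
      rw [pY_def] at hi ⊢
      simp at hi
      interval_cases i <;> simp [pW2_def, List.cons_prefix_cons]),
    scan1_consume pY ['y'] _ (by rw [pY_def]; simp), List.singleton_append]
  rfl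

set_option maxRecDepth 4096 in
theorem chain_default (c : Char) (t : List Char)
    (h1 : ¬ pG <+: (c :: t)) (h2 : ¬ pW1 <+: (c :: t))
    (h3 : ¬ pW2 <+: (c :: t)) (h4 : ¬ pY <+: (c :: t)) :
    chain (c :: t) = c :: chain t := by
  have n2 : ¬ pW1 <+: scan1 pG ['g'] (c :: t) := fun h =>
    h2 (noNew pG ['g'] (by simp) _ _ (by rw [pW1_def]; simp) h)
  have n3 : ¬ pW2 <+: scan1 pW1 ['w'] (scan1 pG ['g'] (c :: t)) := fun h =>
    h3 (noNew pG ['g'] (by simp) _ _ (by rw [pW2_def]; simp)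
      (noNew pW1 ['w'] (by simp) _ _ (by rw [pW2_def]; simp) h))
  have n4 : ¬ pY <+: scan1 pW2 ['w'] (scan1 pW1 ['w'] (scan1 pG ['g'] (c :: t))) := fun h =>
    h4 (noNew pG ['g'] (by simp) _ _ (by rw [pY_def]; simp)
      (noNew pW1 ['w'] (by simp) _ _ (by rw [pY_def]; simp)
        (noNew pW2 ['w'] (by simp) _ _ (by rw [pY_def]; simp) h)))
  rw [chain, chain]
  rw [scan1_cons_ne pG ['g'] c t h1] at n2 n3 n4 ⊢
  rw [scan1_cons_ne pW1 ['w'] _ _ n2] at n3 n4 ⊢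
  rw [scan1_cons_ne pW2 ['w'] _ _ n3] at n4 ⊢
  rw [scan1_cons_ne pY ['y'] _ _ n4]

theorem chain_eq_pvScanRow_aux : ∀ (n : Nat) (l : List Char), l.length ≤ n →
    chain l = pvScanRow l := by
  intro n
  induction n with
  | zero =>
      intro l hl
      have : l = [] := List.eq_nil_of_length_eq_zero (Nat.le_zero.mp hl)
      subst this
      rw [pvScanRow_nil, chain]
      simp [scan1]
  | succ m ih =>
      intro l hl
      match l with
      | [] =>
          rw [pvScanRow_nil, chain]
          simp [scan1]
      | c :: t =>
          by_cases h1 : pG <+: (c :: t)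
          · obtain ⟨rest, hrest⟩ := h1
            rw [← hrest, chain_g, pvScanRow_g,
              ih rest (by rw [← hrest] at hl; rw [pG_def] at hl; simp at hl ⊢; omega)]
          · by_cases h2 : pW1 <+: (c :: t)
            · obtain ⟨rest, hrest⟩ := h2
              rw [← hrest, chain_w1, pvScanRow_w1,
                ih rest (by rw [← hrest] at hl; rw [pW1_def] at hl; simp at hl ⊢; omega)]
            · by_cases h3 : pW2 <+: (c :: t)
              · obtain ⟨rest, hrest⟩ := h3
                rw [← hrest, chain_w2, pvScanRow_w2,
                  ih rest (by rw [← hrest] at hl; rw [pW2_def] at hl; simp at hl ⊢; omega)]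
              · by_cases h4 : pY <+: (c :: t)
                · obtain ⟨rest, hrest⟩ := h4
                  rw [← hrest, chain_y, pvScanRow_y,
                    ih rest (by rw [← hrest] at hl; rw [pY_def] at hl; simp at hl ⊢; omega)]
                · rw [chain_default c t h1 h2 h3 h4, pvScanRow_default c t h1 h2 h3 h4,
                    ih t (by simp at hl ⊢; omega)]

theorem chain_eq_pvScanRow (l : List Char) : chain l = pvScanRow l :=
  chain_eq_pvScanRow_aux l.length l (le_refl _)

-- A's per-row replace pipeline, moved to the list side
theorem rowA_toList (row : String) :
    (PySem.Str.replace
      (PySem.Str.replace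
        (PySem.Str.replace
          (PySem.Str.replace row "\\U0001f7e9" "g")
          "\\u2b1b" "w")
        "\\u2b1c" "w")
      "\\U0001f7e8" "y").toList = chain row.toList := by
  rw [PySem.Str.toList_replace, replace_eq_scan1 _ _ _ (by decide),
    PySem.Str.toList_replace, replace_eq_scan1 _ _ _ (by decide),
    PySem.Str.toList_replace, replace_eq_scan1 _ _ _ (by decide),
    PySem.Str.toList_replace, replace_eq_scan1 _ _ _ (by decide)]
  rfl

-- A's accumulator fold, moved to the list side
theorem foldl_toList (f : String → String) :
    ∀ (wb : List String) (init : String),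
      (wb.foldl (fun acc row => acc ++ f row) init).toList
        = init.toList ++ wb.flatMap (fun row => (f row).toList) := by
  intro wb
  induction wb with
  | nil => intro init; simp
  | cons r t ih =>
      intro init
      simp only [List.foldl_cons, ih, String.toList_append, List.flatMap_cons, List.append_assoc]

-- ===== VERDICT (by name: the statement is the Claim_ definition above) =====
theorem convert_wordle_board_to_db_format_spec : Claim_equal_convert_wordle_board_to_db_format := by
  intro wb _
  unfold Spec_convert_wordle_board_to_db_format
  apply String.toList_inj.mp
  rw [convert_wordle_board_to_db_format, convert_wordle_board_to_db_format_alt,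
    foldl_toList (fun row =>
      PySem.Str.replace
        (PySem.Str.replace
          (PySem.Str.replace
            (PySem.Str.replace row "\\U0001f7e9" "g")
            "\\u2b1b" "w")
          "\\u2b1c" "w")
        "\\U0001f7e8" "y") wb ""]
  simp only [rowA_toList, chain_eq_pvScanRow, String.toList_ofList]
  simp
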